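-- pv_equiv track=rewrite | github.com/FdelMazo/7529rw-TDA | TP1/Ordenamientos/antiMerge.py | antiMerge
-- ===== SOURCE A (Python) =====
-- def antiMerge(arreglo):
--     '''Recibe un arreglo ordenado de mayor a menor y devuelve un arreglo nuevo como peor caso del algoritmo de ordenamientos de MergeSort'''
--     if len(arreglo) < 2:
--         return arreglo
--     izq = []
--     der = []
--     for x in arreglo[::2]:
--         izq.append(x)
--     for x in arreglo[1::2]:
--         der.append(x)
--     return antiMerge(izq) + antiMerge(der)
-- ===== SOURCE B (Python) =====
-- def antiMerge(arreglo):
--     '''Recibe un arreglo ordenado de mayor a menor y devuelve un arreglo nuevo como peor caso del algoritmo de ordenamientos de MergeSort'''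
--     if len(arreglo) < 2:
--         return arreglo
--     n = len(arreglo)
--     w = (n - 1).bit_length()
--     def key(i):
--         # bit-reversal of i over w bits, read LSB-first
--         r = 0
--         for _ in range(w):
--             i, b = divmod(i, 2)
--             r = 2 * r + b
--         return r
--     return [arreglo[i] for i in sorted(range(n), key=key)]
-- ===== Notes on version B (the rewrite author's own statement) =====
-- stated objective: alternative
-- what changed: Replaces the recursive even/odd de-interleaving by a single sort of the indices 0..n-1 under a bit-reversal key: the worst-case permutation is exactly the indices in increasing order of their bit-reversed binary representation.
import Mathlib
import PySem

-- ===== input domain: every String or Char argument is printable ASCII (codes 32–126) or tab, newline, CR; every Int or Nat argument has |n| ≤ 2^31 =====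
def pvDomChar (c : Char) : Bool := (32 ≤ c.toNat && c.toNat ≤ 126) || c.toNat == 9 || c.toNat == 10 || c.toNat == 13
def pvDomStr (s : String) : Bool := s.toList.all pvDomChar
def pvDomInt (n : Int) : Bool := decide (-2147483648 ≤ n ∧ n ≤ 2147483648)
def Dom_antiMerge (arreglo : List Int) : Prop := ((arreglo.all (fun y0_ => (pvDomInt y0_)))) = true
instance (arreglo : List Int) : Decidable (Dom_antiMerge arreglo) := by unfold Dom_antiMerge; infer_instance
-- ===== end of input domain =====

-- B replaces the recursive even/odd de-interleave by a single sort of the indices under a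
-- bit-reversal key (objective: alternative — a different algorithm of the same cost).

-- evensOf xs = xs[::2], oddsOf xs = xs[1::2]; used by port A's termination proof (cited in decreasing_by)
def evensOf : List Int → List Int
  | [] => []
  | [x] => [x]
  | x :: _ :: r => x :: evensOf r

def oddsOf : List Int → List Int
  | [] => []
  | _ :: r => evensOf r

theorem length_evensOf (xs : List Int) : (evensOf xs).length = (xs.length + 1) / 2 := by
  induction xs using evensOf.induct with
  | case1 => simp [evensOf]
  | case2 x => simp [evensOf]
  | case3 x y r ih => simp [evensOf, ih]; omega

theorem length_oddsOf (xs : List Int) : (oddsOf xs).length = xs.length / 2 := by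
  cases xs with
  | nil => simp [oddsOf]
  | cons x r => simp [oddsOf, length_evensOf]

-- characterization of the step-2 slices (the generic filterMap core, then the two slices)
theorem filterMap_two_step (xs : List Int) :
    List.filterMap (fun k => xs[2 * k]?) (List.range ((xs.length + 1) / 2)) = evensOf xs := by
  induction xs using evensOf.induct with
  | case1 => simp [evensOf]
  | case2 x => simp [evensOf]
  | case3 x y r ih =>
    have hc : ((x :: y :: r).length + 1) / 2 = (r.length + 1) / 2 + 1 := by
      rw [show (x :: y :: r).length + 1 = (r.length + 1) + 2 by simp, Nat.add_div_right _ (by norm_num)]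
    rw [hc, List.range_succ_eq_map, List.filterMap_cons, List.filterMap_map]
    simp only [Nat.mul_zero, List.getElem?_cons_zero]
    have : (fun k => (x :: y :: r)[2 * Nat.succ k]?) = (fun k => r[2 * k]?) := by
      funext k
      have h2 : 2 * Nat.succ k = (2 * k) + 1 + 1 := by omega
      rw [h2, List.getElem?_cons_succ, List.getElem?_cons_succ]
    simp only [Function.comp_def, this, ih, evensOf]

-- the element count sliceIndices yields for a step-2 slice over m elements
theorem count_half (m : Nat) : (if 0 < m then (((m : Int) + 2 - 1) / 2).toNat else 0) = (m + 1) / 2 := by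
  rcases Nat.eq_zero_or_pos m with h | h
  · simp [h]
  · rw [if_pos h]
    omega

theorem slice?_step2_even (xs : List Int) :
    PySem.List.slice? xs none none 2 = some (evensOf xs) := by
  unfold PySem.List.slice? PySem.List.sliceIndices
  simp only [if_neg (by norm_num : ¬ (2:Int) = 0)]
  norm_num
  rw [count_half xs.length]
  have hfun : (fun k : Nat => xs[((2 : Int) * (k : Int)).toNat]?) = (fun k : Nat => xs[2 * k]?) := by
    funext k
    have : ((2 : Int) * (k : Int)).toNat = 2 * k := by omega
    rw [this]
  rw [hfun, filterMap_two_step]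

theorem slice?_step2_odd (xs : List Int) :
    PySem.List.slice? xs (some 1) none 2 = some (oddsOf xs) := by
  cases xs with
  | nil => decide
  | cons x r =>
    unfold PySem.List.slice? PySem.List.sliceIndices
    simp only [if_neg (by norm_num : ¬ (2:Int) = 0)]
    norm_num
    rw [count_half r.length]
    have hfun : (fun k : Nat => (x :: r)[((1 : Int) + 2 * (k : Int)).toNat]?) = (fun k : Nat => r[2 * k]?) := by
      funext k
      have : ((1 : Int) + 2 * (k : Int)).toNat = 2 * k + 1 := by omega
      rw [this, List.getElem?_cons_succ]
    rw [hfun, filterMap_two_step]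
    rfl

-- 'for x in l: acc.append(x)' = acc ++ l; used by port A (cited in decreasing_by)
theorem foldl_append_singleton (l acc : List Int) :
    l.foldl (fun a x => a ++ [x]) acc = acc ++ l := by
  induction l generalizing acc with
  | nil => simp
  | cons x r ih => simp [List.foldl, ih]

-- ===== PORT A =====
-- literal port: guard, izq/der built by append loops over arreglo[::2] / arreglo[1::2], recurse and concatenate
def antiMerge (arreglo : List Int) : List Int :=
  if arreglo.length < 2 then arreglo
  else
    let izq := ((PySem.List.slice? arreglo none none 2).getD []).foldl (fun a x => a ++ [x]) []
    let der := ((PySem.List.slice? arreglo (some 1) none 2).getD []).foldl (fun a x => a ++ [x]) []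
    antiMerge izq ++ antiMerge der
termination_by arreglo.length
decreasing_by
  · simp only [slice?_step2_even, Option.getD_some, foldl_append_singleton, List.nil_append,
      length_evensOf]
    omega
  · simp only [slice?_step2_odd, Option.getD_some, foldl_append_singleton, List.nil_append,
      length_oddsOf]
    omega

-- ===== PORT B =====
-- (n - 1).bit_length() of Source B, ported by hand for a nonnegative argument (exact there:
-- number of binary digits, 0 for 0)
def pvBitLength (m : Nat) : Nat :=
  if m = 0 then 0 else pvBitLength (m / 2) + 1
termination_by m
decreasing_by exact Nat.div_lt_self (Nat.pos_of_ne_zero (by assumption)) (by norm_num)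

-- key(i) of Source B: 'r = 0; for _ in range(w): i, b = divmod(i, 2); r = 2*r + b'.
-- divmod(i, 2) (divisor the nonzero literal 2) is ported by its components
-- PySem.Int.floordiv / PySem.Int.mod, which are exactly Python's // and %.
def pvKey (w : Nat) (i : Int) : Int :=
  ((List.range w).foldl
    (fun st _ => (PySem.Int.floordiv st.1 2, 2 * st.2 + PySem.Int.mod st.1 2)) (i, 0)).2

-- port of Source B: guard, then index the array along sorted(range(n), key=key)
def antiMerge_alt (arreglo : List Int) : List Int :=
  if arreglo.length < 2 then arreglo
  else
    let n : Int := PySem.List.len arreglo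
    -- w = (n - 1).bit_length(); here n ≥ 2, so n - 1 ≥ 1 and .toNat is exact
    let w : Nat := pvBitLength (n - 1).toNat
    (PySem.List.sorted (PySem.List.pyRange 0 n 1) (pvKey w) false).map
      (fun i => PySem.List.pyGetD arreglo i 0)  -- arreglo[i]; i comes from range(n), always in range

-- ===== PRECONDITION & SPEC =====
def Spec_antiMerge (arreglo : List Int) (out : List Int) : Prop := out = antiMerge_alt arreglo
instance (arreglo : List Int) (out : List Int) : Decidable (Spec_antiMerge arreglo out) := by unfold Spec_antiMerge; infer_instance

-- ===== CLAIM (what is proved, stated in full; the proofs are below) =====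
def Claim_equal_antiMerge : Prop := ∀ (arreglo : List Int), Dom_antiMerge arreglo → Spec_antiMerge arreglo (antiMerge arreglo)

-- ===== LEMMAS AND PROOFS =====

-- unfolding antiMerge once, with the slices already characterized
theorem antiMerge_eq (xs : List Int) :
    antiMerge xs = if xs.length < 2 then xs
      else antiMerge (evensOf xs) ++ antiMerge (oddsOf xs) := by
  rw [antiMerge]
  split
  · rfl
  · simp only [slice?_step2_even, slice?_step2_odd, Option.getD_some,
      foldl_append_singleton, List.nil_append]

theorem evensOf_map (f : Int → Int) (l : List Int) :
    evensOf (l.map f) = (evensOf l).map f := by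
  induction l using evensOf.induct with
  | case1 => simp [evensOf]
  | case2 x => simp [evensOf]
  | case3 x y r ih => simp [evensOf, ih]

theorem oddsOf_map (f : Int → Int) (l : List Int) :
    oddsOf (l.map f) = (oddsOf l).map f := by
  cases l with
  | nil => simp [oddsOf]
  | cons x r => simp [oddsOf, evensOf_map]

-- antiMerge only rearranges: it commutes with map
theorem antiMerge_map (f : Int → Int) (l : List Int) :
    antiMerge (l.map f) = (antiMerge l).map f := by
  induction h : l.length using Nat.strong_induction_on generalizing l with
  | _ n ih =>
    subst h
    rw [antiMerge_eq, antiMerge_eq l]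
    by_cases h2 : l.length < 2
    · simp [h2]
    · rw [if_neg (by simpa using h2), if_neg h2, evensOf_map, oddsOf_map,
        ih _ (by rw [length_evensOf]; omega) _ rfl,
        ih _ (by rw [length_oddsOf]; omega) _ rfl, List.map_append]

theorem evensOf_cons (y : Int) (r : List Int) : evensOf (y :: r) = y :: oddsOf r := by
  cases r <;> rfl

theorem evens_odds_perm (l : List Int) : (evensOf l ++ oddsOf l).Perm l := by
  induction l using evensOf.induct with
  | case1 => simp [evensOf, oddsOf]
  | case2 x => simp [evensOf, oddsOf]
  | case3 x y r ih =>
    show (x :: evensOf r ++ evensOf (y :: r)).Perm (x :: y :: r)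
    rw [evensOf_cons]
    exact (List.Perm.cons x List.perm_middle).trans ((ih.cons y).cons x)

theorem antiMerge_perm (l : List Int) : (antiMerge l).Perm l := by
  induction h : l.length using Nat.strong_induction_on generalizing l with
  | _ n ih =>
    subst h
    rw [antiMerge_eq]
    by_cases h2 : l.length < 2
    · simp [h2]
    · rw [if_neg h2]
      exact ((ih _ (by rw [length_evensOf]; omega) _ rfl).append
        (ih _ (by rw [length_oddsOf]; omega) _ rfl)).trans (evens_odds_perm l)

-- the even/odd halves of a mapped range
theorem evensOf_map_range (n : Nat) (f : Nat → Int) :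
    evensOf ((List.range n).map f) = (List.range ((n + 1) / 2)).map (fun k => f (2 * k)) := by
  induction n using Nat.strong_induction_on generalizing f with
  | _ n ih =>
    match n with
    | 0 => simp [evensOf]
    | 1 => simp [evensOf]
    | n + 2 =>
      have hr : List.range (n + 2) = 0 :: 1 :: (List.range n).map (fun k => k + 1 + 1) := by
        rw [List.range_succ_eq_map, List.range_succ_eq_map]
        simp [List.map_map, Function.comp_def, Nat.succ_eq_add_one]
      rw [hr]
      simp only [List.map_cons, List.map_map, Function.comp_def, evensOf]
      rw [ih n (by omega) (fun k => f (k + 1 + 1))]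
      have hc : (n + 2 + 1) / 2 = (n + 1) / 2 + 1 := by omega
      rw [hc, List.range_succ_eq_map]
      simp only [List.map_cons, Nat.mul_zero, List.map_map, Function.comp_def]
      congr 1

theorem oddsOf_map_range (n : Nat) (f : Nat → Int) :
    oddsOf ((List.range n).map f) = (List.range (n / 2)).map (fun k => f (2 * k + 1)) := by
  match n with
  | 0 => simp [oddsOf]
  | n + 1 =>
    rw [List.range_succ_eq_map]
    simp only [List.map_cons, List.map_map, Function.comp_def, oddsOf]
    rw [evensOf_map_range n (fun k => f (k + 1))]

-- the index list 0, 1, …, n-1 as Ints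
def idxs (n : Nat) : List Int := (List.range n).map (fun (k : Nat) => (k : Int))

theorem evensOf_idxs (n : Nat) :
    evensOf (idxs n) = (idxs ((n + 1) / 2)).map (fun a => 2 * a) := by
  unfold idxs
  rw [evensOf_map_range, List.map_map]
  apply List.map_congr_left
  intro k _
  simp

theorem oddsOf_idxs (n : Nat) :
    oddsOf (idxs n) = (idxs (n / 2)).map (fun a => 2 * a + 1) := by
  unfold idxs
  rw [oddsOf_map_range, List.map_map]
  apply List.map_congr_left
  intro k _
  simp

-- ---- arithmetic of the bit-reversal key ----

-- recursive specification of the key: w-bit bit-reversal (LSB first into the top)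
def keySpec : Nat → Int → Int
  | 0, _ => 0
  | w + 1, i => PySem.Int.mod i 2 * 2 ^ w + keySpec w (PySem.Int.floordiv i 2)

-- the fold of pvKey with an arbitrary accumulator computes r·2^w + keySpec w i
theorem pvKeyGo_eq (w : Nat) : ∀ (i r : Int),
    (((List.range w).foldl
      (fun st _ => (PySem.Int.floordiv st.1 2, 2 * st.2 + PySem.Int.mod st.1 2)) (i, r)).2)
    = r * 2 ^ w + keySpec w i := by
  induction w with
  | zero => intro i r; simp [keySpec]
  | succ w ih =>
    intro i r
    rw [List.range_succ_eq_map, List.foldl_cons, List.foldl_map, ih]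
    simp only [keySpec]
    ring

theorem pvKey_eq (w : Nat) (i : Int) : pvKey w i = keySpec w i := by
  unfold pvKey
  rw [pvKeyGo_eq]
  ring

theorem mod_two_mem (i : Int) : 0 ≤ PySem.Int.mod i 2 ∧ PySem.Int.mod i 2 < 2 := by
  simp [PySem.Int.mod, Int.fmod_eq_emod]
  omega

theorem keySpec_bounds (w : Nat) (i : Int) : 0 ≤ keySpec w i ∧ keySpec w i < 2 ^ w := by
  induction w generalizing i with
  | zero => simp [keySpec]
  | succ w ih =>
    simp only [keySpec]
    have hm := mod_two_mem i
    have hk := ih (PySem.Int.floordiv i 2)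
    have h2 : (0:Int) < 2 ^ w := by positivity
    constructor
    · nlinarith
    · rw [pow_succ]
      nlinarith

theorem floordiv_two_double (a : Int) : PySem.Int.floordiv (2 * a) 2 = a := by
  simp [PySem.Int.floordiv, Int.fdiv_eq_ediv]

theorem floordiv_two_double_add_one (a : Int) : PySem.Int.floordiv (2 * a + 1) 2 = a := by
  simp [PySem.Int.floordiv, Int.fdiv_eq_ediv]
  omega

theorem mod_two_double (a : Int) : PySem.Int.mod (2 * a) 2 = 0 := by
  simp [PySem.Int.mod, Int.fmod_eq_emod]

theorem mod_two_double_add_one (a : Int) : PySem.Int.mod (2 * a + 1) 2 = 1 := by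
  simp [PySem.Int.mod, Int.fmod_eq_emod]

theorem keySpec_even (w : Nat) (a : Int) : keySpec (w + 1) (2 * a) = keySpec w a := by
  simp only [keySpec, mod_two_double, floordiv_two_double]
  ring

theorem keySpec_odd (w : Nat) (a : Int) : keySpec (w + 1) (2 * a + 1) = 2 ^ w + keySpec w a := by
  simp only [keySpec, mod_two_double_add_one, floordiv_two_double_add_one]
  ring

-- ---- the crux: the de-interleave of the indices is strictly increasing under the key ----
theorem pairwise_key (w : Nat) : ∀ (n : Nat), n ≤ 2 ^ w →
    (antiMerge (idxs n)).Pairwise (fun a b => pvKey w a < pvKey w b) := by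
  simp only [pvKey_eq]
  induction w with
  | zero =>
    intro n hn
    rw [antiMerge_eq, if_pos (by simp [idxs]; omega)]
    match n, hn with
    | 0, _ => simp [idxs]
    | 1, _ => simp [idxs]
  | succ w ih =>
    intro n hn
    by_cases h2 : n < 2
    · rw [antiMerge_eq, if_pos (by simp [idxs]; omega)]
      match n, h2 with
      | 0, _ => simp [idxs]
      | 1, _ => simp [idxs]
    · rw [antiMerge_eq, if_neg (by simp [idxs]; omega), evensOf_idxs, oddsOf_idxs,
        antiMerge_map, antiMerge_map]
      have hm1 : (n + 1) / 2 ≤ 2 ^ w := by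
        rw [pow_succ] at hn; omega
      have hm2 : n / 2 ≤ 2 ^ w := by
        rw [pow_succ] at hn; omega
      rw [List.pairwise_append]
      refine ⟨?_, ?_, ?_⟩
      · exact (ih _ hm1).map _ (fun {a b} hab => by
          simpa [keySpec_even] using hab)
      · exact (ih _ hm2).map _ (fun {a b} hab => by
          simp only [keySpec_odd]
          omega)
      · intro x hx y hy
        rcases List.mem_map.mp hx with ⟨a, _, rfl⟩
        rcases List.mem_map.mp hy with ⟨b, _, rfl⟩
        rw [keySpec_even, keySpec_odd]
        have h1 := keySpec_bounds w a
        have h2 := keySpec_bounds w b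
        omega

theorem lt_pow_bitLength (m : Nat) : m < 2 ^ pvBitLength m := by
  induction m using Nat.strong_induction_on with
  | _ m ih =>
    rw [pvBitLength]
    by_cases h : m = 0
    · simp [h]
    · rw [if_neg h, pow_succ]
      have := ih (m / 2) (Nat.div_lt_self (Nat.pos_of_ne_zero h) (by norm_num))
      omega

theorem pyRange_idxs (n : Nat) : PySem.List.pyRange 0 (n : Int) 1 = idxs n := by
  rw [PySem.List.pyRange_one]
  simp [idxs]

-- ===== VERDICT (by name: the statement is the Claim_ definition above) =====
theorem antiMerge_spec : Claim_equal_antiMerge := by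
  intro arreglo _
  unfold Spec_antiMerge antiMerge_alt
  by_cases h : arreglo.length < 2
  · rw [if_pos h, antiMerge_eq, if_pos h]
  · rw [if_neg h]
    have hlen : PySem.List.len arreglo = (arreglo.length : Int) := PySem.List.len_eq arreglo
    show antiMerge arreglo =
      ((PySem.List.sorted (PySem.List.pyRange 0 (PySem.List.len arreglo) 1)
        (pvKey (pvBitLength ((PySem.List.len arreglo - 1)).toNat)) false).map
        (fun i => PySem.List.pyGetD arreglo i 0))
    have hmap : (idxs arreglo.length).map (fun i => PySem.List.pyGetD arreglo i 0) = arreglo := by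
      have h2 := PySem.List.map_pyGetD_pyRange_zero arreglo 0
      rw [hlen, pyRange_idxs] at h2
      exact h2
    have hle : arreglo.length ≤ 2 ^ pvBitLength (((arreglo.length : Int)) - 1).toNat := by
      have htn : (((arreglo.length : Int)) - 1).toNat = arreglo.length - 1 := by omega
      rw [htn]
      have := lt_pow_bitLength (arreglo.length - 1)
      omega
    rw [hlen, pyRange_idxs,
      PySem.List.sorted_eq_of_perm_of_pairwise_lt _ _ _
        (antiMerge_perm (idxs arreglo.length)) (pairwise_key _ arreglo.length hle),
      ← antiMerge_map, hmap]
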